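-- pv_equiv track=rewrite | github.com/Varato/BresenhamCircleAndLatticeSphere | lattice_sphere.py | LatticeSphere3D
-- ===== SOURCE A (Python) =====
-- def LatticeSphere3D(r):
--     """
--     input:
--         r: int, radius of target sphere
--     output:
--         Q1: indices of Q1 of lattice sphere index S
--         arc_length: length of each logitudinal arc in Q1
--     """
--     if r==0:
--         return [(0,0,0)], [1]
--     i = j = 0
--     # sub 0 for starting points of a new arc
--     k = k0 = r
--     # sum of squares of i and j
--     s = s0 = 0
--     # initial interval in Theorem 3
--     v = v0 = r - 1
--     l = l0 = 2*v0
--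
--     Q1 = []
--     arc_length = []
--
--     while i <= k: # loop over arcs Ai
--         al = 0
--         while j <= k: # loop over voxels on Ai
--             if s > v:
--                 # if s = i^2+j^2 exceeds the interval [u, v],
--                 # then k should decrement by 1, and l, v update.
--                 k = k - 1
--                 v = v + l
--                 l = l - 2
--             if j <= k and (s != v or j !=k):
--                 # Theorem 1. Condition of non-simple voxel
--                 Q1.append((i,j,k))
--                 al += 1
--             # j increases by 1
--             s = s + 2*j + 1
--             j = j + 1
--
--         if al > 0:
--             arc_length.append(al)
--         # start a new arc, where i = j.
--         # Thus increment of i by 1 causes s0 increase by 4i + 2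
--         s0 = s0 + 4*i + 2
--         i = i + 1
--
--         while s0 > v0 and i <= k0:
--             k0 = k0 - 1
--             v0 = v0 + l0
--             l0 = l0 - 2
--         j = i
--         k = k0
--         v = v0
--         l = l0
--         s = s0
--
--     return Q1, arc_length
-- ===== SOURCE B (Python) =====
-- from math import isqrt
--
--
-- def _kround(N):
--     # round(sqrt(N)) for N >= 0, computed exactly with integer isqrt
--     a = isqrt(N)
--     return a + 1 if N - a * a > a else a
--
--
-- def LatticeSphere3D(r):
--     """
--     input:
--         r: int, radius of target sphere
--     output:
--         Q1: indices of Q1 of lattice sphere index S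
--         arc_length: length of each logitudinal arc in Q1
--     """
--     if r == 0:
--         return [(0, 0, 0)], [1]
--     Q1 = []
--     arc_length = []
--     for i in range(r + 1):
--         N0 = r * r - 2 * i * i
--         if N0 < 0 or i > _kround(N0):
--             break
--         al = 0
--         j = i
--         while True:
--             N = r * r - i * i - j * j
--             if N < 0:
--                 break
--             k = _kround(N)
--             if j > k:
--                 break
--             # skip only the simple (diagonal boundary) voxel
--             if not (j == k and i * i + j * j == r * r + k - k * k - 1):
--                 Q1.append((i, j, k))
--                 al += 1
--             j += 1
--         if al > 0:
--             arc_length.append(al)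
--     return Q1, arc_length
-- ===== Notes on version B (the rewrite author's own statement) =====
-- stated objective: alternative
-- what changed: Replaces A's incremental interval state (k,v,l,s updated by additive Bresenham steps, plus a duplicated k0/v0/l0/s0 state machine for arc starts) by a direct per-voxel closed form: k = round(sqrt(r^2-i^2-j^2)) computed exactly with integer isqrt, with the single diagonal voxel excluded by the explicit condition i^2+j^2 == r^2+k-k^2-1.
import Mathlib
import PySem

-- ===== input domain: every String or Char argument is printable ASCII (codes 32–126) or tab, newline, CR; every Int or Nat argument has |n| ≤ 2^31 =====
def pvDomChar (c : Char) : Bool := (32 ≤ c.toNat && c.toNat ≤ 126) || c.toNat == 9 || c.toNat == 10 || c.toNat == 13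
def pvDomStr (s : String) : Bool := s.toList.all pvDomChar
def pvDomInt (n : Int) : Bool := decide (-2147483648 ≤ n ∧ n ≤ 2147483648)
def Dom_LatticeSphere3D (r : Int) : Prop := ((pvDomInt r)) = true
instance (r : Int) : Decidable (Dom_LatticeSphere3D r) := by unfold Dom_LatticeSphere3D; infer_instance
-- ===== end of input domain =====

set_option maxHeartbeats 1600000


-- B replaces A's incremental Bresenham interval state by a direct per-voxel
-- k = round(sqrt(r²-i²-j²)) via integer isqrt (alternative algorithm, same output).
-- The while-loops of both programs are totalized with an explicit fuel argument
-- chosen at each call site to dominate the loop's iteration count (a pure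
-- totality guard; each loop exits by its own condition before fuel runs out).

-- ===== PORT A =====
-- Inner `while j <= k` loop of A.  State: j k s v l, accumulators Q al.
-- Each iteration: optional single decrement of k (with v,l update), conditional
-- append, then s,j advance — exactly as in the Python body.
def aInner (r i : Int) : Nat → Int → Int → Int → Int → Int →
    List (Int × Int × Int) → Int → List (Int × Int × Int) × Int
  | 0, _, _, _, _, _, Q, al => (Q, al)
  | fuel + 1, j, k, s, v, l, Q, al =>
    if j ≤ k then
      if s > v then
        aInner r i fuel (j + 1) (k - 1) (s + 2 * j + 1) (v + l) (l - 2)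
          (if j ≤ k - 1 ∧ (s ≠ v + l ∨ j ≠ k - 1) then Q ++ [(i, j, k - 1)] else Q)
          (if j ≤ k - 1 ∧ (s ≠ v + l ∨ j ≠ k - 1) then al + 1 else al)
      else
        aInner r i fuel (j + 1) k (s + 2 * j + 1) v l
          (if j ≤ k ∧ (s ≠ v ∨ j ≠ k) then Q ++ [(i, j, k)] else Q)
          (if j ≤ k ∧ (s ≠ v ∨ j ≠ k) then al + 1 else al)
    else (Q, al)

-- A's trailing `while s0 > v0 and i <= k0` loop (multiple decrements of k0).
def aK0 : Nat → Int → Int → Int → Int → Int → Int × Int × Int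
  | 0, _, k0, v0, l0, _ => (k0, v0, l0)
  | fuel + 1, i, k0, v0, l0, s0 =>
    if s0 > v0 ∧ i ≤ k0 then aK0 fuel i (k0 - 1) (v0 + l0) (l0 - 2) s0 else (k0, v0, l0)

-- A's outer `while i <= k` loop.  At every loop head the Python state satisfies
-- j = i, k = k0, s = s0, v = v0, l = l0 (set before the loop and re-set at the
-- end of each body), so the loop-head state is carried as i k0 s0 v0 l0 and the
-- inner loop starts from it.
def aOuter (r : Int) : Nat → Int → Int → Int → Int → Int →
    List (Int × Int × Int) → List Int → List (Int × Int × Int) × List Int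
  | 0, _, _, _, _, _, Q, arc => (Q, arc)
  | fuel + 1, i, k0, s0, v0, l0, Q, arc =>
    if i ≤ k0 then
      let p := aInner r i (k0 - i + 1).toNat i k0 s0 v0 l0 Q 0
      let arc' := if p.2 > 0 then arc ++ [p.2] else arc
      let s0' := s0 + 4 * i + 2
      let t := aK0 (k0 - (i + 1) + 1).toNat (i + 1) k0 v0 l0 s0'
      aOuter r fuel (i + 1) t.1 s0' t.2.1 t.2.2 p.1 arc'
    else (Q, arc)

def LatticeSphere3D (r : Int) : (List (Int × Int × Int)) × List Int :=
  if r = 0 then ([(0, 0, 0)], [1])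
  else aOuter r (r + 1).toNat 0 r 0 (r - 1) (2 * (r - 1)) [] []

-- ===== PORT B =====
-- _kround: round(sqrt N) for N ≥ 0, via integer isqrt (math.isqrt ↦ Int.sqrt).
def kfB (N : Int) : Int :=
  if N - Int.sqrt N * Int.sqrt N > Int.sqrt N then Int.sqrt N + 1 else Int.sqrt N

-- B's inner `while True` loop over j (i, j are the nonnegative Python loop vars).
def bInner (r : Int) : Nat → Nat → Nat → List (Int × Int × Int) → Int →
    List (Int × Int × Int) × Int
  | 0, _, _, Q, al => (Q, al)
  | fuel + 1, i, j, Q, al =>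
    if r * r - (i : Int) * (i : Int) - (j : Int) * (j : Int) < 0 then (Q, al)
    else if (j : Int) > kfB (r * r - (i : Int) * (i : Int) - (j : Int) * (j : Int)) then (Q, al)
    else if (j : Int) = kfB (r * r - (i : Int) * (i : Int) - (j : Int) * (j : Int)) ∧
            (i : Int) * (i : Int) + (j : Int) * (j : Int) =
              r * r + kfB (r * r - (i : Int) * (i : Int) - (j : Int) * (j : Int))
                - kfB (r * r - (i : Int) * (i : Int) - (j : Int) * (j : Int))
                  * kfB (r * r - (i : Int) * (i : Int) - (j : Int) * (j : Int)) - 1 then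
      bInner r fuel i (j + 1) Q al
    else
      bInner r fuel i (j + 1)
        (Q ++ [((i : Int), (j : Int),
          kfB (r * r - (i : Int) * (i : Int) - (j : Int) * (j : Int)))])
        (al + 1)

-- B's `for i in range(r+1)` loop with its break.
def bOuter (r : Int) : Nat → Nat → List (Int × Int × Int) → List Int →
    List (Int × Int × Int) × List Int
  | 0, _, Q, arc => (Q, arc)
  | fuel + 1, i, Q, arc =>
    if i < (r + 1).toNat then
      if r * r - 2 * (i : Int) * (i : Int) < 0 ∨
          (i : Int) > kfB (r * r - 2 * (i : Int) * (i : Int)) then (Q, arc)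
      else
        let p := bInner r (r * r - (i : Int) * (i : Int) - (i : Int) * (i : Int) + 1).toNat i i Q 0
        bOuter r fuel (i + 1) p.1 (if p.2 > 0 then arc ++ [p.2] else arc)
    else (Q, arc)

def LatticeSphere3D_alt (r : Int) : (List (Int × Int × Int)) × List Int :=
  if r = 0 then ([(0, 0, 0)], [1]) else bOuter r (r + 1).toNat 0 [] []

-- ===== PRECONDITION & SPEC =====
def Spec_LatticeSphere3D (r : Int) (out : (List (Int × Int × Int)) × List Int) : Prop := out = LatticeSphere3D_alt r
instance (r : Int) (out : (List (Int × Int × Int)) × List Int) : Decidable (Spec_LatticeSphere3D r out) := by unfold Spec_LatticeSphere3D; infer_instance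

-- ===== CLAIM (what is proved, stated in full; the proofs are below) =====
def Claim_equal_LatticeSphere3D : Prop := ∀ (r : Int), Dom_LatticeSphere3D r → Spec_LatticeSphere3D r (LatticeSphere3D r)

-- ===== LEMMAS AND PROOFS =====

lemma sqrt_bounds (N : Int) (h : 0 ≤ N) :
    Int.sqrt N * Int.sqrt N ≤ N ∧ N < (Int.sqrt N + 1) * (Int.sqrt N + 1) := by
  obtain ⟨n, rfl⟩ : ∃ n : Nat, N = (n : Int) := ⟨N.toNat, (Int.toNat_of_nonneg h).symm⟩
  rw [Int.sqrt_natCast]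
  constructor
  · have := Nat.sqrt_le' n
    rw [pow_two] at this
    exact_mod_cast this
  · have := Nat.lt_succ_sqrt' n
    rw [pow_two, Nat.succ_eq_add_one] at this
    exact_mod_cast this

lemma kfB_nonneg (N : Int) : 0 ≤ kfB N := by
  unfold kfB
  have := Int.sqrt_nonneg N
  split <;> omega

-- N ≤ k(k+1) upper characterisation
lemma kfB_upper (N : Int) (h : 0 ≤ N) : N ≤ kfB N * (kfB N + 1) := by
  obtain ⟨h1, h2⟩ := sqrt_bounds N h
  unfold kfB
  split <;> nlinarith

lemma kfB_lower (N : Int) (h : 0 < N) : kfB N * (kfB N - 1) < N := by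
  obtain ⟨h1, h2⟩ := sqrt_bounds N (le_of_lt h)
  have h0 := Int.sqrt_nonneg N
  unfold kfB
  split <;> nlinarith

lemma kfB_zero : kfB 0 = 0 := by decide

lemma kfB_le_iff (N k : Int) (hN : 0 ≤ N) (hk : 0 ≤ k) : kfB N ≤ k ↔ N ≤ k * (k + 1) := by
  have hub := kfB_upper N hN
  have h0 := kfB_nonneg N
  constructor
  · intro h
    nlinarith
  · intro h
    by_contra hc
    push Not at hc
    have hNpos : 0 < N := by
      by_contra hz
      have : N = 0 := by omega
      subst this
      rw [kfB_zero] at hc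
      omega
    have hlb := kfB_lower N hNpos
    nlinarith

lemma kfB_eq (N k : Int) (hk : 0 ≤ k) (h1 : k * (k - 1) < N) (h2 : N ≤ k * (k + 1)) :
    kfB N = k := by
  have hN : 0 ≤ N := by nlinarith
  have hle : kfB N ≤ k := (kfB_le_iff N k hN hk).mpr h2
  have h0 := kfB_nonneg N
  have hub := kfB_upper N hN
  by_contra hc
  have : kfB N ≤ k - 1 := by omega
  nlinarith

lemma kfB_mono (M N : Int) (hM : 0 ≤ M) (h : M ≤ N) : kfB M ≤ kfB N := by
  have hN : 0 ≤ N := le_trans hM h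
  exact (kfB_le_iff M (kfB N) hM (kfB_nonneg N)).mpr (le_trans h (kfB_upper N hN))

-- B's inner loop returns immediately when N < 0 or j exceeds the rounded root.
lemma bInner_exit (r : Int) (fb : Nat) (i j : Nat) (Q : List (Int × Int × Int)) (al : Int)
    (h : r * r - (i : Int) * (i : Int) - (j : Int) * (j : Int) < 0 ∨
         kfB (r * r - (i : Int) * (i : Int) - (j : Int) * (j : Int)) < (j : Int)) :
    bInner r fb i j Q al = (Q, al) := by
  cases fb with
  | zero => rw [bInner]
  | succ m =>
    rw [bInner]
    by_cases hN : r * r - (i : Int) * (i : Int) - (j : Int) * (j : Int) < 0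
    · rw [if_pos hN]
    · rw [if_neg hN, if_pos (by omega)]

-- Main inner-loop equivalence, by induction on A's fuel (≥ remaining width k-j+1).
lemma inner_eq (r : Int) (hr : r ≠ 0) (i : Nat) :
    ∀ (fa : Nat) (j : Nat) (k s v l : Int) (Q : List (Int × Int × Int)) (al : Int) (fb : Nat),
    (k - (j : Int) + 1).toNat ≤ fa →
    (r * r - (i : Int) * (i : Int) - (j : Int) * (j : Int) + 1).toNat ≤ fb →
    s = (i : Int) * (i : Int) + (j : Int) * (j : Int) →
    v = r * r - k * k + k - 1 →
    l = 2 * k - 2 →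
    i ≤ j →
    ((j : Int) ≤ k →
      0 ≤ r * r - (i : Int) * (i : Int) - (j : Int) * (j : Int) ∧
      kfB (r * r - (i : Int) * (i : Int) - (j : Int) * (j : Int)) ≤ k ∧
      (k ≤ kfB (r * r - (i : Int) * (i : Int) - (j : Int) * (j : Int)) + 1 ∨ k ≤ (j : Int))) →
    (k < (j : Int) →
      (r * r - (i : Int) * (i : Int) - (j : Int) * (j : Int) < 0 ∨
       kfB (r * r - (i : Int) * (i : Int) - (j : Int) * (j : Int)) < (j : Int))) →
    aInner r (i : Int) fa (j : Int) k s v l Q al = bInner r fb i j Q al := by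
  intro fa
  induction fa with
  | zero =>
    intro j k s v l Q al fb hn hnb hs hv hl hij hIn hOut
    have hkj : k < (j : Int) := by omega
    rw [aInner]
    exact (bInner_exit r fb i j Q al (hOut hkj)).symm
  | succ m ih =>
    intro j k s v l Q al fb hn hnb hs hv hl hij hIn hOut
    by_cases hjk : (j : Int) ≤ k
    · obtain ⟨hN, hktk, hkub⟩ := hIn hjk
      obtain ⟨KT, hKT⟩ : ∃ x, kfB (r * r - (i : Int) * (i : Int) - (j : Int) * (j : Int)) = x :=
        ⟨_, rfl⟩
      have hub := kfB_upper _ hN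
      have hkt0 := kfB_nonneg (r * r - (i : Int) * (i : Int) - (j : Int) * (j : Int))
      rw [hKT] at hktk hkub hub hkt0
      have hij' : (i : Int) ≤ (j : Int) := by exact_mod_cast hij
      have hi0 : (0 : Int) ≤ (i : Int) := Int.natCast_nonneg i
      have hj0 : (0 : Int) ≤ (j : Int) := Int.natCast_nonneg j
      have hcast : ((j + 1 : Nat) : Int) = (j : Int) + 1 := by push_cast; ring
      have hfb1 : 1 ≤ fb := by omega
      obtain ⟨fbm, rfl⟩ : ∃ x, fb = x + 1 := ⟨fb - 1, by omega⟩
      by_cases hjkt : (j : Int) ≤ KT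
      · -- j is a voxel column of this arc: k ∈ {KT, KT+1}, post-if k = KT
        have hk_cases : k = KT ∨ k = KT + 1 := by rcases hkub with h | h <;> omega
        have hktpos : 1 ≤ KT := by
          by_contra hc
          have hKT0 : KT = 0 := by omega
          have hj00 : (j : Int) = 0 := by omega
          have hi00 : (i : Int) = 0 := by omega
          have hrr : (1 : Int) ≤ r * r := by
            have h1 : r ≤ -1 ∨ 1 ≤ r := by omega
            rcases h1 with h | h <;> nlinarith
          rw [hi00, hj00, hKT0] at hub
          simp at hub
          omega
        have hNpos : 0 < r * r - (i : Int) * (i : Int) - (j : Int) * (j : Int) := by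
          rcases eq_or_lt_of_le hN with h | h
          · exfalso
            rw [← h] at hKT
            rw [kfB_zero] at hKT
            omega
          · exact h
        have hlb := kfB_lower _ hNpos
        rw [hKT] at hlb
        -- the single conditional decrement lands exactly on KT
        have hs_iff : s > v ↔ k = KT + 1 := by
          rw [hs, hv]
          constructor
          · intro h
            rcases hk_cases with hk | hk
            · exfalso; rw [hk] at h; nlinarith
            · exact hk
          · intro hk
            rw [hk]; nlinarith
        -- the recursive calls agree (IH applied at j+1 with k = KT)
        have hstep : ∀ (Q1 : List (Int × Int × Int)) (al1 : Int),
            aInner r (i : Int) m ((j : Int) + 1) KT (s + 2 * (j : Int) + 1)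
              (r * r - KT * KT + KT - 1) (2 * KT - 2) Q1 al1 =
            bInner r fbm i (j + 1) Q1 al1 := by
          intro Q1 al1
          rw [show ((j : Int) + 1) = ((j + 1 : Nat) : Int) from hcast.symm]
          refine ih (j + 1) KT (s + 2 * (j : Int) + 1) _ _ Q1 al1 fbm
            (by rw [hcast]; omega)
            (by rw [hcast]
                have : r * r - (i : Int) * (i : Int) - ((j : Int) + 1) * ((j : Int) + 1) =
                    (r * r - (i : Int) * (i : Int) - (j : Int) * (j : Int)) - 2 * (j : Int) - 1 := by
                  ring
                rw [this]
                omega)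
            (by rw [hs, hcast]; ring) rfl rfl (by omega) ?_ ?_
          · -- entry invariant at j+1
            intro hjj
            rw [hcast] at hjj ⊢
            obtain ⟨KT', hKT'⟩ : ∃ x,
                kfB (r * r - (i : Int) * (i : Int) - ((j : Int) + 1) * ((j : Int) + 1)) = x :=
              ⟨_, rfl⟩
            rw [hKT']
            have hN'eq : r * r - (i : Int) * (i : Int) - ((j : Int) + 1) * ((j : Int) + 1) =
                (r * r - (i : Int) * (i : Int) - (j : Int) * (j : Int)) - 2 * (j : Int) - 1 := by
              ring
            have hprod : 0 ≤ (KT - 1) * (KT - 2) := by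
              by_cases h : KT ≤ 1
              · have h1 : KT = 1 := by omega
                rw [h1]; norm_num
              · nlinarith
            have hN' : 0 ≤ r * r - (i : Int) * (i : Int) - ((j : Int) + 1) * ((j : Int) + 1) := by
              rw [hN'eq]; nlinarith [hlb, hprod, hjj]
            have hmono := kfB_mono _ _ hN' (by rw [hN'eq]; omega :
              r * r - (i : Int) * (i : Int) - ((j : Int) + 1) * ((j : Int) + 1) ≤
              r * r - (i : Int) * (i : Int) - (j : Int) * (j : Int))
            rw [hKT', hKT] at hmono
            refine ⟨hN', hmono, ?_⟩
            by_cases hd : KT ≤ (j : Int) + 1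
            · exact Or.inr hd
            · refine Or.inl ?_
              by_contra hcc
              have h2 : KT' ≤ KT - 2 := by omega
              have h3 := kfB_upper _ hN'
              have h4 := kfB_nonneg
                (r * r - (i : Int) * (i : Int) - ((j : Int) + 1) * ((j : Int) + 1))
              rw [hKT'] at h3 h4
              rw [hN'eq] at h3
              nlinarith [hlb, h3, h2, h4, hd]
          · -- exit invariant at j+1
            intro _
            rw [hcast]
            by_cases hN' : 0 ≤ r * r - (i : Int) * (i : Int) - ((j : Int) + 1) * ((j : Int) + 1)
            · refine Or.inr ?_
              have hmono := kfB_mono _ _ hN' (by ring_nf; omega :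
                r * r - (i : Int) * (i : Int) - ((j : Int) + 1) * ((j : Int) + 1) ≤
                r * r - (i : Int) * (i : Int) - (j : Int) * (j : Int))
              rw [hKT] at hmono
              omega
            · exact Or.inl (by omega)
        -- unfold one step of B and one step of A
        rw [bInner, if_neg (by omega), if_neg (by rw [hKT]; omega), hKT]
        rw [aInner, if_pos hjk]
        by_cases hsv : s > v
        · have hk := hs_iff.mp hsv
          rw [if_pos hsv]
          have e_k : k - 1 = KT := by omega
          have e_v : v + l = r * r - KT * KT + KT - 1 := by rw [hv, hl, hk]; ring
          have e_l : l - 2 = 2 * KT - 2 := by rw [hl, hk]; ring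
          rw [e_k, e_v, e_l]
          by_cases hexcl : (j : Int) = KT ∧
              (i : Int) * (i : Int) + (j : Int) * (j : Int) = r * r + KT - KT * KT - 1
          · rw [if_pos hexcl]
            have hcond : ¬ ((j : Int) ≤ KT ∧
                (s ≠ r * r - KT * KT + KT - 1 ∨ (j : Int) ≠ KT)) := by
              intro hcc
              rcases hcc.2 with h | h
              · exact h (by rw [hs, hexcl.2]; ring)
              · exact h hexcl.1
            rw [if_neg hcond, if_neg hcond]
            exact hstep Q al
          · rw [if_neg hexcl]
            have hcond : (j : Int) ≤ KT ∧
                (s ≠ r * r - KT * KT + KT - 1 ∨ (j : Int) ≠ KT) := by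
              refine ⟨hjkt, ?_⟩
              by_cases h1 : (j : Int) = KT
              · refine Or.inl ?_
                intro h2
                exact hexcl ⟨h1, by rw [hs] at h2; omega⟩
              · exact Or.inr h1
            rw [if_pos hcond, if_pos hcond]
            exact hstep (Q ++ [((i : Int), (j : Int), KT)]) (al + 1)
        · have hk : k = KT := by
            rcases hk_cases with hk | hk
            · exact hk
            · exact absurd (hs_iff.mpr hk) hsv
          rw [if_neg hsv]
          have e_v : v = r * r - KT * KT + KT - 1 := by rw [hv, hk]
          have e_l : l = 2 * KT - 2 := by rw [hl, hk]
          rw [hk, e_v, e_l]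
          by_cases hexcl : (j : Int) = KT ∧
              (i : Int) * (i : Int) + (j : Int) * (j : Int) = r * r + KT - KT * KT - 1
          · rw [if_pos hexcl]
            have hcond : ¬ ((j : Int) ≤ KT ∧
                (s ≠ r * r - KT * KT + KT - 1 ∨ (j : Int) ≠ KT)) := by
              intro hcc
              rcases hcc.2 with h | h
              · exact h (by rw [hs, hexcl.2]; ring)
              · exact h hexcl.1
            rw [if_neg hcond, if_neg hcond]
            exact hstep Q al
          · rw [if_neg hexcl]
            have hcond : (j : Int) ≤ KT ∧
                (s ≠ r * r - KT * KT + KT - 1 ∨ (j : Int) ≠ KT) := by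
              refine ⟨hjkt, ?_⟩
              by_cases h1 : (j : Int) = KT
              · refine Or.inl ?_
                intro h2
                exact hexcl ⟨h1, by rw [hs] at h2; omega⟩
              · exact Or.inr h1
            rw [if_pos hcond, if_pos hcond]
            exact hstep (Q ++ [((i : Int), (j : Int), KT)]) (al + 1)
      · -- KT < j ≤ k: then k = j, the decrement fires, nothing is appended,
        -- and both loops stop
        have hkj2 : k = (j : Int) := by rcases hkub with h | h <;> omega
        have hsv : s > v := by
          rw [hs, hv, hkj2]
          nlinarith [hub, hkt0]
        rw [aInner, if_pos hjk, if_pos hsv,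
          if_neg (show ¬ ((j : Int) ≤ k - 1 ∧ (s ≠ v + l ∨ (j : Int) ≠ k - 1)) by
            intro hcc; omega),
          if_neg (show ¬ ((j : Int) ≤ k - 1 ∧ (s ≠ v + l ∨ (j : Int) ≠ k - 1)) by
            intro hcc; omega)]
        have hA2 : aInner r (i : Int) m ((j : Int) + 1) (k - 1) (s + 2 * (j : Int) + 1)
            (v + l) (l - 2) Q al = (Q, al) := by
          cases m with
          | zero => rw [aInner]
          | succ m' => rw [aInner, if_neg (by omega)]
        rw [hA2]
        exact (bInner_exit r (fbm + 1) i j Q al (Or.inr (by rw [hKT]; omega))).symm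
    · rw [aInner, if_neg (by omega)]
      exact (bInner_exit r fb i j Q al (hOut (by omega))).symm

-- aK0 preserves the interval shape, only decreases k0, establishes the
-- post-while condition and keeps the round-root lower bound.
lemma aK0_spec (r : Int) :
    ∀ (fuel : Nat) (i k0 v0 l0 s0 : Int), (k0 - i + 1).toNat ≤ fuel →
    1 ≤ i →
    v0 = r * r - k0 * k0 + k0 - 1 →
    l0 = 2 * k0 - 2 →
    (0 ≤ r * r - s0 → kfB (r * r - s0) ≤ k0) →
    (aK0 fuel i k0 v0 l0 s0).2.1 = r * r - (aK0 fuel i k0 v0 l0 s0).1 * (aK0 fuel i k0 v0 l0 s0).1 + (aK0 fuel i k0 v0 l0 s0).1 - 1 ∧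
    (aK0 fuel i k0 v0 l0 s0).2.2 = 2 * (aK0 fuel i k0 v0 l0 s0).1 - 2 ∧
    (aK0 fuel i k0 v0 l0 s0).1 ≤ k0 ∧
    ¬(s0 > (aK0 fuel i k0 v0 l0 s0).2.1 ∧ i ≤ (aK0 fuel i k0 v0 l0 s0).1) ∧
    (0 ≤ r * r - s0 → kfB (r * r - s0) ≤ (aK0 fuel i k0 v0 l0 s0).1) := by
  intro fuel
  induction fuel with
  | zero =>
    intro i k0 v0 l0 s0 hn hi hv hl hLB
    rw [aK0]
    exact ⟨hv, hl, le_refl _, by omega, hLB⟩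
  | succ m ih =>
    intro i k0 v0 l0 s0 hn hi hv hl hLB
    rw [aK0]
    by_cases hc : s0 > v0 ∧ i ≤ k0
    · rw [if_pos hc]
      have hk1 : 1 ≤ k0 := le_trans hi hc.2
      have hLB' : 0 ≤ r * r - s0 → kfB (r * r - s0) ≤ k0 - 1 := by
        intro hNn
        have : r * r - s0 ≤ (k0 - 1) * ((k0 - 1) + 1) := by nlinarith [hc.1]
        exact (kfB_le_iff (r * r - s0) (k0 - 1) hNn (by omega)).mpr this
      have := ih i (k0 - 1) (v0 + l0) (l0 - 2) s0 (by omega) hi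
        (by rw [hv, hl]; ring) (by rw [hl]; ring) hLB'
      exact ⟨this.1, this.2.1, by omega, this.2.2.2.1, this.2.2.2.2⟩
    · rw [if_neg hc]
      exact ⟨hv, hl, le_refl _, by omega, hLB⟩

-- Outer loop equivalence.
lemma outer_eq (r : Int) (hr : r ≠ 0) :
    ∀ (fa : Nat) (i : Nat) (k0 s0 v0 l0 : Int) (Q : List (Int × Int × Int)) (arc : List Int) (fb : Nat),
    (k0 - (i : Int) + 1).toNat ≤ fa →
    (r + 1).toNat - i ≤ fb →
    s0 = 2 * (i : Int) * (i : Int) →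
    v0 = r * r - k0 * k0 + k0 - 1 →
    l0 = 2 * k0 - 2 →
    k0 ≤ r →
    ¬(s0 > v0 ∧ (i : Int) ≤ k0) →
    ((i : Int) ≤ r → 0 ≤ r * r - 2 * (i : Int) * (i : Int) →
      kfB (r * r - 2 * (i : Int) * (i : Int)) ≤ k0) →
    aOuter r fa (i : Int) k0 s0 v0 l0 Q arc = bOuter r fb i Q arc := by
  intro fa
  induction fa with
  | zero =>
    intro i k0 s0 v0 l0 Q arc fb hn hnb hs hv hl hkr hPW hLB
    have hik : ¬ ((i : Int) ≤ k0) := by omega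
    rw [aOuter]
    cases fb with
    | zero => rw [bOuter]
    | succ fbm =>
      rw [bOuter]
      by_cases hran : i < (r + 1).toNat
      · rw [if_pos hran]
        rw [if_pos ?_]
        by_cases hN0 : 0 ≤ r * r - 2 * (i : Int) * (i : Int)
        · right
          have := hLB (by omega) hN0
          omega
        · left; omega
      · rw [if_neg hran]
  | succ m ih =>
    intro i k0 s0 v0 l0 Q arc fb hn hnb hs hv hl hkr hPW hLB
    rw [aOuter]
    by_cases hik : (i : Int) ≤ k0
    · rw [if_pos hik]
      have hi0 : (0 : Int) ≤ (i : Int) := Int.natCast_nonneg i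
      have hk00 : 0 ≤ k0 := le_trans hi0 hik
      have hsv : ¬ s0 > v0 := fun h => hPW ⟨h, hik⟩
      have hN0lb : k0 * k0 - k0 + 1 ≤ r * r - 2 * (i : Int) * (i : Int) := by
        rw [hs, hv] at hsv; omega
      have hN0pos : 0 < r * r - 2 * (i : Int) * (i : Int) := by nlinarith
      have hle : kfB (r * r - 2 * (i : Int) * (i : Int)) ≤ k0 :=
        hLB (le_trans hik hkr) (le_of_lt hN0pos)
      have hkf : kfB (r * r - 2 * (i : Int) * (i : Int)) = k0 :=
        kfB_eq _ k0 hk00 (by nlinarith) (by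
          have := kfB_upper (r * r - 2 * (i : Int) * (i : Int)) (le_of_lt hN0pos)
          have h0 := kfB_nonneg (r * r - 2 * (i : Int) * (i : Int))
          nlinarith)
      have hran : i < (r + 1).toNat := by
        have : (i : Int) ≤ r := le_trans hik hkr
        omega
      obtain ⟨fbm, rfl⟩ : ∃ x, fb = x + 1 := ⟨fb - 1, by omega⟩
      rw [bOuter, if_pos hran, if_neg (by rw [hkf]; omega)]
      have hNi : r * r - (i : Int) * (i : Int) - (i : Int) * (i : Int) =
          r * r - 2 * (i : Int) * (i : Int) := by ring
      have hinner : aInner r (i : Int) (k0 - (i : Int) + 1).toNat (i : Int) k0 s0 v0 l0 Q 0 =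
          bInner r (r * r - (i : Int) * (i : Int) - (i : Int) * (i : Int) + 1).toNat i i Q 0 :=
        inner_eq r hr i (k0 - (i : Int) + 1).toNat i k0 s0 v0 l0 Q 0
          (r * r - (i : Int) * (i : Int) - (i : Int) * (i : Int) + 1).toNat le_rfl le_rfl
          (by rw [hs]; ring) hv hl (le_refl i)
          (by intro _; rw [hNi, hkf]; exact ⟨le_of_lt hN0pos, le_refl k0, Or.inl (by omega)⟩)
          (by intro h; exact absurd hik (by omega))
      simp only [hinner]
      have hts := aK0_spec r (k0 - ((i : Int) + 1) + 1).toNat ((i : Int) + 1) k0 v0 l0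
        (s0 + 4 * (i : Int) + 2) le_rfl (by omega) hv hl
        (by
          intro hNn
          have heq : r * r - (s0 + 4 * (i : Int) + 2) =
              (r * r - 2 * (i : Int) * (i : Int)) - (4 * (i : Int) + 2) := by rw [hs]; ring
          rw [heq] at hNn ⊢
          exact le_trans (kfB_mono _ _ hNn (by omega)) (le_of_eq hkf))
      have hcast : ((i + 1 : Nat) : Int) = (i : Int) + 1 := by push_cast; ring
      have := ih (i + 1)
        (aK0 (k0 - ((i : Int) + 1) + 1).toNat ((i : Int) + 1) k0 v0 l0 (s0 + 4 * (i : Int) + 2)).1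
        (s0 + 4 * (i : Int) + 2)
        (aK0 (k0 - ((i : Int) + 1) + 1).toNat ((i : Int) + 1) k0 v0 l0 (s0 + 4 * (i : Int) + 2)).2.1
        (aK0 (k0 - ((i : Int) + 1) + 1).toNat ((i : Int) + 1) k0 v0 l0 (s0 + 4 * (i : Int) + 2)).2.2
        (bInner r (r * r - (i : Int) * (i : Int) - (i : Int) * (i : Int) + 1).toNat i i Q 0).1
        (if (bInner r (r * r - (i : Int) * (i : Int) - (i : Int) * (i : Int) + 1).toNat i i Q 0).2 > 0
          then arc ++ [(bInner r (r * r - (i : Int) * (i : Int) - (i : Int) * (i : Int) + 1).toNat i i Q 0).2]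
          else arc)
        fbm
        (by rw [hcast]; have := hts.2.2.1; omega)
        (by omega)
        (by rw [hs, hcast]; ring)
        hts.1 hts.2.1
        (le_trans hts.2.2.1 hkr)
        (by rw [hcast]; exact hts.2.2.2.1)
        (by
          rw [hcast]
          intro h1 h2
          have heq : r * r - 2 * ((i : Int) + 1) * ((i : Int) + 1) =
              r * r - (s0 + 4 * (i : Int) + 2) := by rw [hs]; ring
          rw [heq] at h2 ⊢
          exact hts.2.2.2.2 h2)
      rw [hcast] at this
      exact this
    · rw [if_neg hik]
      cases fb with
      | zero => rw [bOuter]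
      | succ fbm =>
        rw [bOuter]
        by_cases hran : i < (r + 1).toNat
        · rw [if_pos hran]
          rw [if_pos ?_]
          by_cases hN0 : 0 ≤ r * r - 2 * (i : Int) * (i : Int)
          · right
            have := hLB (by omega) hN0
            omega
          · left; omega
        · rw [if_neg hran]

-- ===== VERDICT (by name: the statement is the Claim_ definition above) =====
theorem LatticeSphere3D_spec : Claim_equal_LatticeSphere3D := by
  intro r _
  unfold Spec_LatticeSphere3D LatticeSphere3D LatticeSphere3D_alt
  by_cases hr : r = 0
  · simp [hr]
  · rw [if_neg hr, if_neg hr]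
    have := outer_eq r hr (r + 1).toNat 0 r 0 (r - 1) (2 * (r - 1)) [] [] (r + 1).toNat
      (by push_cast; omega) (by omega) (by norm_num) (by ring) (by ring) le_rfl
      (by push_cast; omega)
      (by
        intro h1 h2
        push_cast at h1 h2 ⊢
        have hr1 : 1 ≤ r := by omega
        rw [show r * r - (0:Int) = r * r by ring,
          kfB_eq (r * r) r (by omega) (by nlinarith) (by nlinarith)])
    have h00 : ((0 : Nat) : Int) = (0 : Int) := rfl
    rw [h00] at this
    exact this
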